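-- pv_equiv track=rewrite | github.com/smie8/tira2022 | week2/onechar.py | count
-- ===== SOURCE A (Python) =====
-- def count(s):
--     count = 0
--     length = 0
--
--     for i in range(len(s)):
--         if i != 0 and s[i] == s[i-1]:
--             length += 1
--         else:
--             length = 1
--
--         count += length
--
-- # O(N^2) solution:
--     # for i in range(len(s)):
--     #     for j in range(i, len(s)):
--     #         if i != j and s[i] != s[j]:
--     #             break
--     #         count += 1
--
--     return count
-- ===== SOURCE B (Python) =====
-- from itertools import groupby
--
--
-- def count(s):
--     total = 0
--     for _, g in groupby(s):
--         n = sum(1 for _ in g)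
--         total += n * (n + 1) // 2
--     return total
-- ===== Notes on version B (the rewrite author's own statement) =====
-- stated objective: idiomatic
-- what changed: Replaces the per-index incremental run-length accumulator with itertools.groupby: the string is split into maximal runs of equal characters and each run of length n contributes the closed form n*(n+1)//2.
import Mathlib
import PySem

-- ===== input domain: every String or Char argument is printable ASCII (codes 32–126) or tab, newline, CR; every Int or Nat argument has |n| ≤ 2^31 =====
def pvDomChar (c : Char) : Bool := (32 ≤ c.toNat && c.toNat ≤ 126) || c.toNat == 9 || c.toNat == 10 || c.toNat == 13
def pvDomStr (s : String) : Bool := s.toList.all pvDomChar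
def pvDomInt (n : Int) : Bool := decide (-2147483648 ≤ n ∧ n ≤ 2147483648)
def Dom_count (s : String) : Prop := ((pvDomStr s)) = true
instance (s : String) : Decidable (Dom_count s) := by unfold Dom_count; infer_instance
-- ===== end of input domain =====

-- B replaces A's per-index run-length accumulator by splitting the string into
-- maximal runs of equal characters, each run of length n contributing n*(n+1)//2 (idiomatic).

-- ===== PORT A =====
-- loop body of A: state (count, length), index i
def stepA (l : List Char) (st : Int × Int) (i : Int) : Int × Int :=
  let length : Int :=
    if i ≠ 0 ∧ PySem.List.pyGetD l i ' ' = PySem.List.pyGetD l (i - 1) ' ' then st.2 + 1 else 1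
  (st.1 + length, length)

def count (s : String) : Int :=
  ((PySem.List.pyRange 0 (PySem.Str.len s) 1).foldl (stepA s.toList) (0, 0)).1

-- ===== PORT B =====
-- inner loop of groupby: current group key p, current group length n; yields run lengths
def runsGo : List Char → Char → Int → List Int
  | [], _, n => [n]
  | c :: rest, p, n => if c = p then runsGo rest p (n + 1) else n :: runsGo rest c 1

def runLengths : List Char → List Int
  | [] => []
  | c :: rest => runsGo rest c 1

def count_alt (s : String) : Int :=
  (runLengths s.toList).foldl (fun t n => t + PySem.Int.floordiv (n * (n + 1)) 2) 0

-- ===== PRECONDITION & SPEC =====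
def Spec_count (s : String) (out : Int) : Prop := out = count_alt s
instance (s : String) (out : Int) : Decidable (Spec_count s out) := by unfold Spec_count; infer_instance

-- ===== CLAIM (what is proved, stated in full; the proofs are below) =====
def Claim_equal_count : Prop := ∀ (s : String), Dom_count s → Spec_count s (count s)

-- ===== LEMMAS AND PROOFS =====

-- common reference function: remaining chars, previous char, current run length so far
def countFrom : List Char → Char → Int → Int
  | [], _, _ => 0
  | c :: rest, p, len =>
      let len' : Int := if c = p then len + 1 else 1
      len' + countFrom rest c len'

def tri (n : Int) : Int := PySem.Int.floordiv (n * (n + 1)) 2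

lemma tri_succ (n : Int) : tri (n + 1) = tri n + (n + 1) := by
  obtain ⟨k, hk⟩ := Int.even_mul_succ_self n
  have h1 : n * (n + 1) = 2 * k := by omega
  have h2 : (n + 1) * (n + 1 + 1) = 2 * (k + n + 1) := by nlinarith [hk]
  simp only [tri, PySem.Int.floordiv_eq_ediv_of_pos (by norm_num : (0:Int) < 2), h1, h2]
  rw [Int.mul_ediv_cancel_left _ (by norm_num), Int.mul_ediv_cancel_left _ (by norm_num)]
  ring

lemma tri_one : tri 1 = 1 := by decide

lemma loopB (rest : List Char) : ∀ (p : Char) (n t : Int),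
    (runsGo rest p n).foldl (fun t L => t + PySem.Int.floordiv (L * (L + 1)) 2) t
      = t + tri n + countFrom rest p n := by
  induction rest with
  | nil => intro p n t; simp [runsGo, countFrom, tri]
  | cons c rest ih =>
      intro p n t
      by_cases h : c = p
      · subst h
        simp only [runsGo, countFrom, if_true]
        rw [ih, tri_succ]; ring
      · simp only [runsGo, countFrom, if_neg h, List.foldl_cons]
        rw [ih]
        have h2 : t + PySem.Int.floordiv (n * (n + 1)) 2 = t + tri n := rfl
        rw [h2, tri_one]; ring

lemma loopA (l : List Char) : ∀ (k i : Nat), l.length - i = k → 1 ≤ i → i ≤ l.length →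
    ∀ (cnt len : Int),
    ((PySem.List.pyRange (i : Int) (l.length : Int) 1).foldl (stepA l) (cnt, len)).1
      = cnt + countFrom (l.drop i) (PySem.List.pyGetD l ((i : Int) - 1) ' ') len := by
  intro k
  induction k with
  | zero =>
      intro i hk h1 h2 cnt len
      have hi : i = l.length := by omega
      subst hi
      rw [PySem.List.pyRange_one_eq_nil (by omega)]
      simp [countFrom]
  | succ k ih =>
      intro i hk h1 h2 cnt len
      have hlt : i < l.length := by omega
      rw [PySem.List.pyRange_one_cons (by exact_mod_cast hlt)]
      simp only [List.foldl_cons]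
      have hgi : PySem.List.pyGetD l (i : Int) ' ' = l[i] := by
        rw [PySem.List.pyGetD_eq_getElem l ' ' (by exact_mod_cast Nat.zero_le i)
          (by exact_mod_cast hlt)]
        simp
      have hdrop : l.drop i = l[i] :: l.drop (i + 1) := List.drop_eq_getElem_cons hlt
      have hne : (i : Int) ≠ 0 := by omega
      have hstep : stepA l (cnt, len) (i : Int) =
          (cnt + (if l[i] = PySem.List.pyGetD l ((i : Int) - 1) ' ' then len + 1 else 1),
           (if l[i] = PySem.List.pyGetD l ((i : Int) - 1) ' ' then len + 1 else 1)) := by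
        simp only [stepA, hgi, hne, ne_eq, not_false_iff, true_and]
      rw [hstep]
      have hcast : ((i : Int) + 1) = ((i + 1 : Nat) : Int) := by push_cast; ring
      rw [hcast, ih (i + 1) (by omega) (by omega) (by omega)]
      have hprev : PySem.List.pyGetD l (((i + 1 : Nat) : Int) - 1) ' ' = l[i] := by
        have : (((i + 1 : Nat) : Int) - 1) = (i : Int) := by push_cast; ring
        rw [this, hgi]
      rw [hprev, hdrop]
      simp only [countFrom]
      ring

lemma count_eq_countFrom (s : String) :
    count s = match s.toList with
      | [] => 0
      | c :: rest => 1 + countFrom rest c 1 := by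
  unfold count
  rw [PySem.Str.len_eq]
  cases hs : s.toList with
  | nil => simp [PySem.List.pyRange_one_eq_nil]
  | cons c rest =>
      have hlen : 0 < (c :: rest).length := by simp
      rw [PySem.List.pyRange_one_cons
        (show (0:Int) < ((c :: rest).length : Int) by exact_mod_cast hlen)]
      simp only [List.foldl_cons]
      have hstep0 : stepA (c :: rest) (0, 0) (0 : Int) = (1, 1) := by
        simp [stepA]
      rw [hstep0]
      rcases Nat.eq_zero_or_pos rest.length with hr | hr
      · have : rest = [] := List.eq_nil_of_length_eq_zero hr
        subst this
        rw [show ((0:Int) + 1) = ((1:Nat):Int) by norm_num]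
        rw [PySem.List.pyRange_one_eq_nil (by simp)]
        simp [countFrom]
      · rw [show ((0:Int) + 1) = ((1:Nat):Int) by norm_num]
        rw [loopA (c :: rest) ((c :: rest).length - 1) 1 (by omega) (by omega) (by simp)]
        have : PySem.List.pyGetD (c :: rest) (((1:Nat):Int) - 1) ' ' = c := by
          norm_num [PySem.List.pyGetD_zero_cons]
        rw [this]
        simp

lemma count_alt_eq_countFrom (s : String) :
    count_alt s = match s.toList with
      | [] => 0
      | c :: rest => 1 + countFrom rest c 1 := by
  unfold count_alt
  cases hs : s.toList with
  | nil => simp [runLengths]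
  | cons c rest =>
      simp only [runLengths, loopB rest c 1 0, tri_one]
      ring

-- ===== VERDICT (by name: the statement is the Claim_ definition above) =====
theorem count_spec : Claim_equal_count := by
  intro s _
  unfold Spec_count
  rw [count_eq_countFrom, count_alt_eq_countFrom]
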